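-- pv_equiv track=rewrite | github.com/breader1/Interview-test | main.py | get_site
-- ===== SOURCE A (Python) =====
-- def get_site(node_name):
--     """
--     This function extracts the site code from the node name. it uses isdigit and isalpha to check
--     for the first instance of a digit, and the last a letter.
--
--     @param node_name: The node name.
--     @return: The site code - starting with a number and ending with a letter.
--     """
--     start = None
--     end = None
--
--     for i, char in enumerate(node_name):
--         if start is None and char.isdigit():
--             start = i
--         if char.isalpha():
--             end = i
--
--     # If both start and end are found, return the stuff in the middle
--     if start is not None and end is not None and end >= start:
--         return node_name[start:end + 1]
--     return None
-- ===== SOURCE B (Python) =====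
-- def get_site(node_name):
--     # B: forward probe for the first digit + backward probe (over the reversed
--     # string) for the last letter, instead of A's single combined sweep.
--     n = len(node_name)
--     start = next((i for i, c in enumerate(node_name) if c.isdigit()), None)
--     rev = next((j for j, c in enumerate(reversed(node_name)) if c.isalpha()), None)
--     if start is None or rev is None:
--         return None
--     end = n - 1 - rev
--     if end >= start:
--         return node_name[start:end + 1]
--     return None
-- ===== Notes on version B (the rewrite author's own statement) =====
-- stated objective: alternative
-- what changed: Replaces A's single sweep that threads a (start,end) accumulator pair through every character with two independent probes: a forward find-first-index for a digit and a backward find over the reversed string for the last letter.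
import Mathlib
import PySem

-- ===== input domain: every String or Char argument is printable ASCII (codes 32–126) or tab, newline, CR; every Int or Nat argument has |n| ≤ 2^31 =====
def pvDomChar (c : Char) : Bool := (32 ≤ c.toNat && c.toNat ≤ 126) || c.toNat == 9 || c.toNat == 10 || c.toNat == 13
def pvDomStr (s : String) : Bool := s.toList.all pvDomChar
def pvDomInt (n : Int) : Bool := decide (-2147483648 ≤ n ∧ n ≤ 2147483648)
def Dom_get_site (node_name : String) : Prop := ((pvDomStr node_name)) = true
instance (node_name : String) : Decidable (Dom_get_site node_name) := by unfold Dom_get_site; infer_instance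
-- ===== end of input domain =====

-- B replaces A's single accumulator-pair sweep with a forward first-digit probe
-- and a backward (reversed-string) last-letter probe; objective: alternative.


-- ===== PORT A =====
-- one left-to-right sweep keeping (start, end) like the Python accumulator pair
def get_site (node_name : String) : Option String :=
  let p := (PySem.List.enumerate node_name.toList 0).foldl
    (fun (st : Option Int × Option Int) ic =>
      let st1 := if st.1.isNone && PySem.Chars.isdigit ic.2 then some ic.1 else st.1
      let st2 := if PySem.Chars.isalpha ic.2 then some ic.1 else st.2
      (st1, st2)) (none, none)
  match p with
  | (some s, some e) =>
      if e ≥ s then some (PySem.Str.slice node_name (some s) (some (e + 1))) else none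
  | _ => none

-- ===== PORT B =====
-- forward probe for the first digit; backward probe over the reversed characters
def get_site_alt (node_name : String) : Option String :=
  let cs := node_name.toList
  let start? := (cs.findIdx? PySem.Chars.isdigit).map (fun k => (k : Int))
  let rev? := cs.reverse.findIdx? PySem.Chars.isalpha
  match start? with
  | none => none
  | some s =>
    match rev? with
    | none => none
    | some j =>
      let e : Int := ((cs.length - 1 - j : Nat) : Int)
      if e ≥ s then some (PySem.Str.slice node_name (some s) (some (e + 1))) else none

-- ===== PRECONDITION & SPEC =====
def Spec_get_site (node_name : String) (out : Option String) : Prop := out = get_site_alt node_name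
instance (node_name : String) (out : Option String) : Decidable (Spec_get_site node_name out) := by unfold Spec_get_site; infer_instance

-- ===== CLAIM (what is proved, stated in full; the proofs are below) =====
def Claim_equal_get_site : Prop := ∀ (node_name : String), Dom_get_site node_name → Spec_get_site node_name (get_site node_name)

-- ===== LEMMAS AND PROOFS =====

-- abbreviation for A's loop body
def pvStep (st : Option Int × Option Int) (ic : Int × Char) : Option Int × Option Int :=
  (if st.1.isNone && PySem.Chars.isdigit ic.2 then some ic.1 else st.1,
   if PySem.Chars.isalpha ic.2 then some ic.1 else st.2)

-- first component of A's sweep = forward findIdx? probe (shifted by the offset)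
theorem pvFst (cs : List Char) : ∀ (s : Nat) (a b : Option Int),
    ((PySem.List.enumerate cs (s : Int)).foldl pvStep (a, b)).1
      = (a.or ((cs.findIdx? PySem.Chars.isdigit).map (fun k => ((s + k : Nat) : Int)))) := by
  induction cs with
  | nil => intro s a b; simp [PySem.List.enumerate]
  | cons c rest ih =>
    intro s a b
    rw [PySem.List.enumerate_cons]
    have h1 : (s : Int) + 1 = ((s + 1 : Nat) : Int) := by push_cast; ring
    simp only [List.foldl_cons, h1]
    rw [show pvStep (a, b) ((s : Int), c)
        = (if a.isNone && PySem.Chars.isdigit c then some (s : Int) else a,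
           if PySem.Chars.isalpha c then some (s : Int) else b) from rfl]
    rw [ih]
    cases a with
    | some x => simp
    | none =>
      cases hd : PySem.Chars.isdigit c with
      | true => simp [hd, List.findIdx?_cons]
      | false =>
        simp only [Option.isNone_none, hd, Bool.and_false, if_false,
          List.findIdx?_cons, Bool.false_eq_true]
        cases hk : rest.findIdx? PySem.Chars.isdigit with
        | none => simp
        | some k => simp; ring

-- second component of A's sweep = backward findIdx? probe over the reversed list
theorem pvSnd (cs : List Char) : ∀ (s : Nat) (a b : Option Int),
    ((PySem.List.enumerate cs (s : Int)).foldl pvStep (a, b)).2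
      = (((cs.reverse.findIdx? PySem.Chars.isalpha).map
            (fun j => ((s + (cs.length - 1 - j) : Nat) : Int))).or b) := by
  induction cs with
  | nil => intro s a b; simp [PySem.List.enumerate]
  | cons c rest ih =>
    intro s a b
    rw [PySem.List.enumerate_cons]
    have h1 : (s : Int) + 1 = ((s + 1 : Nat) : Int) := by push_cast; ring
    simp only [List.foldl_cons, h1]
    rw [show pvStep (a, b) ((s : Int), c)
        = (if a.isNone && PySem.Chars.isdigit c then some (s : Int) else a,
           if PySem.Chars.isalpha c then some (s : Int) else b) from rfl]
    rw [ih]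
    rw [List.reverse_cons, List.findIdx?_append]
    cases hj : rest.reverse.findIdx? PySem.Chars.isalpha with
    | some j =>
      have hjl : j < rest.length := by
        have := (List.findIdx?_eq_some_iff_findIdx_eq).mp hj
        simpa using this.1
      simp only [Option.map_some, Option.or]
      congr 1
      have : s + 1 + (rest.length - 1 - j) = s + (rest.length + 1 - 1 - j) := by omega
      simp [this]
    | none =>
      by_cases ha : PySem.Chars.isalpha c
      · simp [ha, List.length_reverse]
      · simp [ha]

theorem get_site_spec' : ∀ (node_name : String),
    get_site node_name = get_site_alt node_name := by
  intro nn
  unfold get_site get_site_alt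
  have hf := pvFst nn.toList 0 none none
  have hs := pvSnd nn.toList 0 none none
  simp only [Nat.cast_zero] at hf hs
  have hpair : (PySem.List.enumerate nn.toList 0).foldl
      (fun (st : Option Int × Option Int) ic =>
        (if st.1.isNone && PySem.Chars.isdigit ic.2 then some ic.1 else st.1,
         if PySem.Chars.isalpha ic.2 then some ic.1 else st.2)) (none, none)
      = ((nn.toList.findIdx? PySem.Chars.isdigit).map (fun k => ((0 + k : Nat) : Int)),
         (nn.toList.reverse.findIdx? PySem.Chars.isalpha).map
            (fun j => ((0 + (nn.toList.length - 1 - j) : Nat) : Int))) := by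
    have : (fun (st : Option Int × Option Int) ic =>
        (if st.1.isNone && PySem.Chars.isdigit ic.2 then some ic.1 else st.1,
         if PySem.Chars.isalpha ic.2 then some ic.1 else st.2)) = pvStep := rfl
    rw [this]
    refine Prod.ext ?_ ?_
    · simpa using hf
    · simpa using hs
  simp only [hpair, Nat.zero_add]
  cases h1 : nn.toList.findIdx? PySem.Chars.isdigit with
  | none => simp
  | some k =>
    cases h2 : nn.toList.reverse.findIdx? PySem.Chars.isalpha with
    | none => simp
    | some j => simp

-- ===== VERDICT (by name: the statement is the Claim_ definition above) =====
theorem get_site_spec : Claim_equal_get_site := by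
  intro nn _
  unfold Spec_get_site
  exact get_site_spec' nn
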